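-- pv_equiv track=rewrite | github.com/PaulMcGuirk/advent2023 | python/day04.py | _scratchcards_elvish
-- ===== SOURCE A (Python) =====
-- def _count_matches(winners, drawn):
--     return len(winners & drawn)
--
-- def _scratchcards_elvish(cards):
--     tots = [1] * len(cards)
--
--     for i, game in enumerate(cards):
--         winners, drawn = game
--         wins = _count_matches(winners, drawn)
--         end = min(i + wins + 1, len(cards))
--         for j in range(i + 1, end):
--             tots[j] += tots[i]
--
--     return sum(tots)
-- ===== SOURCE B (Python) =====
-- def _scratchcards_elvish(cards):
--     # Back-to-front pass with a prefix-sum list: pres[k] is the total copy count of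
--     # the k most recently processed (i.e. following) cards, so each card's count is
--     # 1 + (sum of the counts of its next `wins` cards) read off the prefix sums.
--     pres = [0]
--     for winners, drawn in reversed(cards):
--         wins = len(winners & drawn)
--         k = len(pres) - 1
--         c = 1 + pres[k] - pres[k - min(wins, k)]
--         pres.append(pres[k] + c)
--     return pres[-1]
-- ===== Notes on version B (the rewrite author's own statement) =====
-- stated objective: alternative
-- what changed: Replaces A's forward in-place range additions over a tots array with a single backward pass that builds a prefix-sum list of copy counts, reading each card's count off the prefix sums instead of propagating it by an inner loop.
import Mathlib
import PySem

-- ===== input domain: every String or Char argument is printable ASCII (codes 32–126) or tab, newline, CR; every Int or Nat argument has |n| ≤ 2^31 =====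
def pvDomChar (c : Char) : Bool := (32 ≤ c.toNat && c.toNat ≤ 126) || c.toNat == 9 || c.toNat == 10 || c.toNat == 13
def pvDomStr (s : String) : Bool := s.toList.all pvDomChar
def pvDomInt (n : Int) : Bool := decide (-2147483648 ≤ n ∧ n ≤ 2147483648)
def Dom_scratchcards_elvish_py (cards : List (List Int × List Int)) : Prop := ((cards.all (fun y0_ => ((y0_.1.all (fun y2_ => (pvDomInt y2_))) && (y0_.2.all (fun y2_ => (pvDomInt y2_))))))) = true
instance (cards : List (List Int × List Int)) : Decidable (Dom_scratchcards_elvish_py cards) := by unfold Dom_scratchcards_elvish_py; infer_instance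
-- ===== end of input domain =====

-- B replaces A's forward in-place range additions over tots with one backward pass that
-- builds a prefix-sum list of copy counts; the return values are proved equal.

-- ===== PORT A =====
-- _count_matches(winners, drawn) = len(winners & drawn); the arguments are Python sets,
-- carried here as lists of the distinct elements, so the intersection size is the number
-- of elements of winners that occur in drawn (exact on set inputs).
def pvCountMatchesA (winners drawn : List Int) : Nat :=
  (winners.filter (fun x => drawn.contains x)).length

-- the loop 'for i, game in enumerate(cards)' carrying i and tots;
-- inner loop 'for j in range(i+1, end): tots[j] += tots[i]' is the foldl over range' (i+1).
def pvLoopA (n : Nat) (i : Nat) (tots : List Int) : List (List Int × List Int) → List Int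
  | [] => tots
  | (winners, drawn) :: rest =>
      let wins := pvCountMatchesA winners drawn
      let endd := min (i + wins + 1) n
      let tots' := (List.range' (i+1) (endd - (i+1))).foldl
        (fun t j => t.set j (t.getD j 0 + t.getD i 0)) tots
      pvLoopA n (i+1) tots' rest

def scratchcards_elvish_py (cards : List (List Int × List Int)) : Int :=
  let n := cards.length
  (pvLoopA n 0 (List.replicate n (1 : Int)) cards).sum

-- ===== PORT B =====
def pvCountMatchesB (winners drawn : List Int) : Nat :=
  (winners.filter (fun x => drawn.contains x)).length

-- one iteration of Source B's 'for winners, drawn in reversed(cards)' loop body;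
-- the indices k and k - min(wins, k) are always in range, so getD is exact for pres[·].
def pvStepB (pres : List Int) (card : List Int × List Int) : List Int :=
  let wins := pvCountMatchesB card.1 card.2
  let k := pres.length - 1
  let c := 1 + pres.getD k 0 - pres.getD (k - min wins k) 0
  pres ++ [pres.getD k 0 + c]

def scratchcards_elvish_py_alt (cards : List (List Int × List Int)) : Int :=
  let pres := cards.reverse.foldl pvStepB [0]
  pres.getD (pres.length - 1) 0

-- ===== PRECONDITION & SPEC =====
def Spec_scratchcards_elvish_py (cards : List (List Int × List Int)) (out : Int) : Prop := out = scratchcards_elvish_py_alt cards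
instance (cards : List (List Int × List Int)) (out : Int) : Decidable (Spec_scratchcards_elvish_py cards out) := by unfold Spec_scratchcards_elvish_py; infer_instance

-- ===== CLAIM (what is proved, stated in full; the proofs are below) =====
def Claim_equal_scratchcards_elvish_py : Prop := ∀ (cards : List (List Int × List Int)), Dom_scratchcards_elvish_py cards → Spec_scratchcards_elvish_py cards (scratchcards_elvish_py cards)

-- ===== LEMMAS AND PROOFS =====

-- wins of a card (the two ports' helpers are definitionally equal)
def pvWins (card : List Int × List Int) : Nat := pvCountMatchesA card.1 card.2

-- the backward copy counts: pvCnts cards = [c_0, …, c_{n-1}] with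
-- c_i = 1 + sum of the next (wins i) counts (take clamps at the end of the list)
def pvCnts : List (List Int × List Int) → List Int
  | [] => []
  | card :: rest =>
      let c := pvCnts rest
      (1 + (c.take (pvWins card)).sum) :: c

lemma pvCnts_length (l : List (List Int × List Int)) : (pvCnts l).length = l.length := by
  induction l with
  | nil => rfl
  | cons a l ih => simp [pvCnts, ih]

-- prefix sum of the first m entries, read through getD (0 outside)
def pvSumTo (l : List Int) (m : Nat) : Int :=
  ((List.range m).map (fun j => l.getD j 0)).sum

lemma pvSumTo_succ (l : List Int) (m : Nat) :
    pvSumTo l (m+1) = pvSumTo l m + l.getD m 0 := by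
  simp [pvSumTo, List.range_succ]

lemma pvSumTo_congr {l1 l2 : List Int} (m : Nat)
    (h : ∀ j, j < m → l1.getD j 0 = l2.getD j 0) : pvSumTo l1 m = pvSumTo l2 m := by
  induction m with
  | zero => rfl
  | succ m ih =>
      rw [pvSumTo_succ, pvSumTo_succ, ih (fun j hj => h j (Nat.lt_succ_of_lt hj)),
        h m (Nat.lt_succ_self m)]

lemma pvSumTo_length (l : List Int) : pvSumTo l l.length = l.sum := by
  induction l using List.reverseRecOn with
  | nil => rfl
  | append_singleton xs x ih =>
      rw [List.length_append, List.sum_append]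
      simp only [List.length_singleton, pvSumTo_succ]
      have hc : pvSumTo (xs ++ [x]) xs.length = pvSumTo xs xs.length :=
        pvSumTo_congr xs.length (fun j hj => List.getD_append _ _ _ _ hj)
      rw [hc, ih]
      simp [List.getD]

lemma pvGetD_set_self {l : List Int} {k : Nat} (hk : k < l.length) (v : Int) :
    (l.set k v).getD k 0 = v := by
  simp [List.getD, hk]

lemma pvGetD_set_ne (l : List Int) {k j : Nat} (hne : k ≠ j) (v : Int) :
    (l.set k v).getD j 0 = l.getD j 0 := by
  simp [List.getD, List.getElem?_set_ne hne]

-- effect of A's inner loop: length preserved and pointwise description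
lemma pvInner_spec (i : Nat) :
    ∀ (m s : Nat) (t : List Int), i < s → s + m ≤ t.length →
    ((List.range' s m).foldl (fun t j => t.set j (t.getD j 0 + t.getD i 0)) t).length = t.length ∧
    ∀ j : Nat, ((List.range' s m).foldl (fun t j => t.set j (t.getD j 0 + t.getD i 0)) t).getD j 0
      = t.getD j 0 + (if s ≤ j ∧ j < s + m then t.getD i 0 else 0) := by
  intro m
  induction m with
  | zero =>
      intro s t _ _
      refine ⟨rfl, fun j => ?_⟩
      simp
  | succ m ih =>
      intro s t his hlen
      have hs : s < t.length := by omega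
      set t1 := t.set s (t.getD s 0 + t.getD i 0) with ht1
      have hlen1 : t1.length = t.length := by simp [ht1]
      have hrec := ih (s+1) t1 (by omega) (by omega)
      rw [List.range'_succ]
      simp only [List.foldl_cons]
      rw [← ht1]
      refine ⟨by rw [hrec.1, hlen1], fun j => ?_⟩
      rw [hrec.2 j]
      have hti : t1.getD i 0 = t.getD i 0 := pvGetD_set_ne t (by omega) _
      rw [hti]
      by_cases hjs : j = s
      · subst hjs
        rw [pvGetD_set_self hs]
        have c1 : j ≤ j ∧ j < j + (m+1) := ⟨le_refl j, by omega⟩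
        have c2 : ¬ (j + 1 ≤ j ∧ j < j + 1 + m) := by omega
        rw [if_neg c2, if_pos c1]; ring
      · rw [pvGetD_set_ne t (fun h => hjs h.symm)]
        by_cases h1 : s + 1 ≤ j ∧ j < s + 1 + m
        · have h2 : s ≤ j ∧ j < s + (m+1) := by omega
          rw [if_pos h1, if_pos h2]
        · have h2 : ¬ (s ≤ j ∧ j < s + (m+1)) := by omega
          rw [if_neg h1, if_neg h2]

-- dot product of tots (offset i) against a count vector c
def pvDot (tots : List Int) (i : Nat) (c : List Int) : Int :=
  ((List.range c.length).map (fun j => tots.getD (i+j) 0 * c.getD j 0)).sum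

lemma pvDot_cons (tots : List Int) (i : Nat) (x : Int) (c : List Int) :
    pvDot tots i (x :: c) = tots.getD i 0 * x + pvDot tots (i+1) c := by
  simp only [pvDot, List.length_cons, List.range_succ_eq_map, List.map_cons,
    List.map_map, List.sum_cons]
  congr 1
  refine congrArg List.sum (List.map_congr_left ?_)
  intro j _
  simp only [Function.comp_apply, Nat.succ_eq_add_one, List.getD_cons_succ]
  rw [show i + (j + 1) = i + 1 + j from by omega]

lemma pvDot_shift_add (c : List Int) :
    ∀ (t t' : List Int) (i w : Nat) (a : Int),
    (∀ j, j < c.length → t'.getD (i+j) 0 = t.getD (i+j) 0 + (if j < w then a else 0)) →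
    pvDot t' i c = pvDot t i c + a * (c.take w).sum := by
  induction c with
  | nil => intro t t' i w a _; simp [pvDot]
  | cons x c ih =>
      intro t t' i w a h
      rw [pvDot_cons, pvDot_cons]
      have h0 := h 0 (by simp)
      simp only [Nat.add_zero] at h0
      have htail : ∀ j, j < c.length →
          t'.getD (i+1+j) 0 = t.getD (i+1+j) 0 + (if j < w - 1 then a else 0) := by
        intro j hj
        have := h (j+1) (by simpa using Nat.succ_lt_succ hj)
        have e : i + (j + 1) = i + 1 + j := by omega
        rw [e] at this
        rw [this]
        congr 1
        by_cases hw : j + 1 < w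
        · rw [if_pos hw, if_pos (by omega)]
        · rw [if_neg hw, if_neg (by omega)]
      rw [ih t t' (i+1) (w-1) a htail]
      cases w with
      | zero =>
          rw [h0]
          simp
      | succ w' =>
          rw [h0, if_pos (by omega)]
          have : w' + 1 - 1 = w' := rfl
          rw [this]
          simp [List.take_succ_cons]
          ring

-- A's loop computes prefix(untouched) + dot of current tots against the backward counts
lemma pvLoopA_spec :
    ∀ (rest : List (List Int × List Int)) (i : Nat) (tots : List Int),
      tots.length = i + rest.length →
      (pvLoopA (i + rest.length) i tots rest).sum
        = pvSumTo tots i + pvDot tots i (pvCnts rest) := by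
  intro rest
  induction rest with
  | nil =>
      intro i tots hlen
      simp only [pvLoopA, pvCnts, pvDot, List.length_nil, List.range_zero,
        List.map_nil, List.sum_nil, add_zero]
      rw [← pvSumTo_length tots, hlen]
      simp
  | cons card rest ih =>
      intro i tots hlen
      obtain ⟨winners, drawn⟩ := card
      simp only [pvLoopA]
      set n := i + ((winners, drawn) :: rest).length with hn
      have hnr : n = i + 1 + rest.length := by simp [hn]; omega
      set wins := pvCountMatchesA winners drawn with hw
      set endd := min (i + wins + 1) n with he
      have hend1 : i + 1 ≤ endd := by omega
      have hend2 : endd ≤ n := by omega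
      have hinner := pvInner_spec i (endd - (i+1)) (i+1) tots (Nat.lt_succ_self i)
        (by omega)
      set tots' := (List.range' (i+1) (endd - (i+1))).foldl
        (fun t j => t.set j (t.getD j 0 + t.getD i 0)) tots with ht'
      have hlt' : tots'.length = tots.length := hinner.1
      have htp : ∀ j : Nat, tots'.getD j 0
          = tots.getD j 0 + (if i+1 ≤ j ∧ j < endd then tots.getD i 0 else 0) := by
        intro j
        have := hinner.2 j
        have hee : i + 1 + (endd - (i+1)) = endd := by omega
        rw [hee] at this
        exact this
      have ihs := ih (i+1) tots' (by omega)
      rw [← hnr] at ihs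
      rw [ihs]
      -- prefix part
      have hpre : pvSumTo tots' (i+1) = pvSumTo tots i + tots.getD i 0 := by
        rw [pvSumTo_succ]
        have h1 : pvSumTo tots' i = pvSumTo tots i :=
          pvSumTo_congr i (fun j hj => by
            rw [htp j, if_neg (by omega), add_zero])
        have h2 : tots'.getD i 0 = tots.getD i 0 := by
          rw [htp i, if_neg (by omega), add_zero]
        rw [h1, h2]
      -- dot part
      set c := pvCnts rest with hc
      have hcl : c.length = rest.length := pvCnts_length rest
      have hdot : pvDot tots' (i+1) c = pvDot tots (i+1) c + tots.getD i 0 * (c.take wins).sum := by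
        apply pvDot_shift_add c tots tots' (i+1) wins (tots.getD i 0)
        intro j hj
        rw [htp (i+1+j)]
        congr 1
        by_cases hjw : j < wins
        · rw [if_pos hjw, if_pos (by constructor <;> omega)]
        · rw [if_neg hjw, if_neg (by omega)]
      rw [hpre, hdot]
      -- the target side
      have hcons : pvCnts ((winners, drawn) :: rest)
          = (1 + (c.take wins).sum) :: c := by
        simp [pvCnts, pvWins, ← hc, ← hw]
      rw [hcons, pvDot_cons]
      ring

-- dot of all-ones against c is the sum of c
lemma pvDot_ones (n : Nat) (c : List Int) (hcl : c.length = n) :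
    pvDot (List.replicate n (1 : Int)) 0 c = c.sum := by
  rw [← pvSumTo_length c]
  unfold pvDot pvSumTo
  apply congrArg
  apply List.map_congr_left
  intro j hj
  rw [List.mem_range] at hj
  have hjn : j < n := by omega
  have h1 : (List.replicate n (1 : Int)).getD (0 + j) 0 = 1 := by
    simp [List.getD, hjn]
  rw [h1, one_mul]

-- B's fold invariant: pres is the (reversed) prefix-sum list of the counts of the
-- already-processed suffix 'done' (l is the still-to-process part of reversed(cards))
lemma pvFoldB_spec :
    ∀ (l done : List (List Int × List Int)) (pres : List Int),
      pres.length = done.length + 1 →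
      (∀ k, k ≤ done.length → pres.getD k 0 = ((pvCnts done).drop (done.length - k)).sum) →
      (l.foldl pvStepB pres).length = l.length + done.length + 1 ∧
      (∀ k, k ≤ l.length + done.length →
        (l.foldl pvStepB pres).getD k 0
          = ((pvCnts (l.reverse ++ done)).drop (l.length + done.length - k)).sum) := by
  intro l
  induction l with
  | nil =>
      intro done pres hlen hinv
      simpa using ⟨hlen, hinv⟩
  | cons a l ih =>
      intro done pres hlen hinv
      simp only [List.foldl_cons]
      set m := done.length with hm
      set c := pvCnts done with hc
      have hcl : c.length = m := pvCnts_length done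
      set w := pvWins a with hw
      -- the step
      have hstep1 : (pvStepB pres a).length = m + 2 := by
        simp [pvStepB, hlen]
      have hk : pres.length - 1 = m := by omega
      have hsum : pres.getD m 0 = c.sum := by
        have := hinv m (le_refl m)
        simpa using this
      have hdropsum : pres.getD (m - min w m) 0 = (c.drop (min w m)).sum := by
        have := hinv (m - min w m) (by omega)
        have he : m - (m - min w m) = min w m := by omega
        rw [he] at this
        exact this
      have htake_min : c.take (min w m) = c.take w := by
        by_cases h : w ≤ m
        · rw [Nat.min_eq_left h]
        · rw [Nat.min_eq_right (by omega)]
          rw [List.take_of_length_le (by omega), List.take_of_length_le (by omega)]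
      have hcv : (1 : Int) + pres.getD (pres.length - 1) 0
            - pres.getD (pres.length - 1 - min (pvCountMatchesB a.1 a.2) (pres.length - 1)) 0
          = 1 + (c.take w).sum := by
        have hwb : pvCountMatchesB a.1 a.2 = w := rfl
        rw [hwb, hk, hsum, hdropsum]
        have hsplit : (c.take (min w m)).sum + (c.drop (min w m)).sum = c.sum := by
          rw [← List.sum_append, List.take_append_drop]
        rw [← htake_min]
        omega
      have hcnts_cons : pvCnts (a :: done) = (1 + (c.take w).sum) :: c := by
        simp [pvCnts, ← hc, ← hw]
      -- the new pres satisfies the invariant for done' = a :: done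
      have hinv' : ∀ k, k ≤ m + 1 →
          (pvStepB pres a).getD k 0 = ((pvCnts (a :: done)).drop (m + 1 - k)).sum := by
        intro k hkm
        rcases Nat.lt_or_ge k (m + 1) with hlt | hge
        · -- old entries, untouched by the append
          have hkp : k < pres.length := by omega
          have hgd : (pvStepB pres a).getD k 0 = pres.getD k 0 := by
            simp only [pvStepB]
            exact List.getD_append _ _ _ _ hkp
          rw [hgd, hinv k (by omega), hcnts_cons]
          have he : m + 1 - k = (m - k) + 1 := by omega
          rw [he, List.drop_succ_cons]
        · -- the appended entry
          have hke : k = m + 1 := by omega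
          subst hke
          have hgd : (pvStepB pres a).getD (m+1) 0
              = pres.getD (pres.length - 1) 0
                + ((1:Int) + pres.getD (pres.length - 1) 0
                  - pres.getD (pres.length - 1 - min (pvCountMatchesB a.1 a.2) (pres.length - 1)) 0) := by
            simp only [pvStepB]
            have : m + 1 = pres.length := by omega
            rw [this]
            simp [List.getD]
          rw [hgd, hcv, hk, hsum, hcnts_cons]
          simp only [Nat.sub_self, List.drop_zero, List.sum_cons]
          ring
      have := ih (a :: done) (pvStepB pres a) (by simpa using hstep1) hinv'
      refine ⟨?_, ?_⟩
      · rw [this.1]; simp; omega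
      · intro k hkm
        have hrw : l.reverse ++ a :: done = (a :: l).reverse ++ done := by simp
        have h2 := this.2 k (by simp at hkm ⊢; omega)
        rw [hrw] at h2
        have he1 : l.length + (a :: done).length = (a :: l).length + done.length := by
          simp; omega
        rw [he1] at h2
        exact h2

-- ===== VERDICT (by name: the statement is the Claim_ definition above) =====
theorem scratchcards_elvish_py_spec : Claim_equal_scratchcards_elvish_py := by
  intro cards _
  unfold Spec_scratchcards_elvish_py scratchcards_elvish_py scratchcards_elvish_py_alt
  -- A's side
  have hA := pvLoopA_spec cards 0 (List.replicate cards.length (1 : Int)) (by simp)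
  simp only [Nat.zero_add] at hA
  have hA0 : pvSumTo (List.replicate cards.length (1 : Int)) 0 = 0 := rfl
  rw [hA0, zero_add, pvDot_ones cards.length (pvCnts cards) (pvCnts_length cards)] at hA
  -- B's side
  have hB := pvFoldB_spec cards.reverse [] [0] (by simp)
    (by intro k hk; simp only [List.length_nil, Nat.le_zero] at hk; subst hk; simp [pvCnts])
  have hlen : (cards.reverse.foldl pvStepB [0]).length = cards.length + 1 := by
    have := hB.1; simpa using this
  have hval := hB.2 cards.length (by simp)
  simp only [List.length_reverse, List.reverse_reverse, List.append_nil,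
    List.length_nil, Nat.add_zero, Nat.sub_self, List.drop_zero] at hval
  simp only [hA, hlen]
  have : cards.length + 1 - 1 = cards.length := by omega
  rw [this, hval]
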